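-- pv_equiv track=rewrite | github.com/Huaramo/vcHMM | vcHMM.py | del_duplicate_ins
-- ===== SOURCE A (Python) =====
-- def del_duplicate_ins(insertions):
--     """
--     Deletes all duplicate insertions from insertion list.
--     e.g.
--         [200 2, 200 2, 202 4] -> [200 2, 202 4]
--         #0: Insertions at Index 200 with len of 2
--         #1: Insertions at Index 202 ...
--     """
--     insertions = sorted(insertions)
--     unique_inserts = {}
--
--     for insert in insertions:
--         insert = [(insert[0], insert[1]), insert[2]]
--         if insert[0] in unique_inserts:
--             unique_inserts[insert[0]].append(insert[1])
--         else:
--             unique_inserts[insert[0]] = [insert[1]]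
--
--     return unique_inserts
-- ===== SOURCE B (Python) =====
-- def del_duplicate_ins(insertions):
--     """
--     Deletes all duplicate insertions from insertion list.
--     Groups the sorted insertions by (index, length) in one pass over
--     contiguous runs, instead of a per-element dict membership test.
--     """
--     s = sorted(insertions)
--     result = {}
--     i = 0
--     n = len(s)
--     while i < n:
--         key = (s[i][0], s[i][1])
--         j = i
--         vals = []
--         while j < n and (s[j][0], s[j][1]) == key:
--             vals.append(s[j][2])
--             j += 1
--         result[key] = vals
--         i = j
--     return result
-- ===== Notes on version B (the rewrite author's own statement) =====
-- stated objective: alternative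
-- what changed: After sorting, B consumes each contiguous run of equal (index,len) keys in one inner pass and stores the finished group once, instead of A's per-element dict membership test with append-or-create.
import Mathlib
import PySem

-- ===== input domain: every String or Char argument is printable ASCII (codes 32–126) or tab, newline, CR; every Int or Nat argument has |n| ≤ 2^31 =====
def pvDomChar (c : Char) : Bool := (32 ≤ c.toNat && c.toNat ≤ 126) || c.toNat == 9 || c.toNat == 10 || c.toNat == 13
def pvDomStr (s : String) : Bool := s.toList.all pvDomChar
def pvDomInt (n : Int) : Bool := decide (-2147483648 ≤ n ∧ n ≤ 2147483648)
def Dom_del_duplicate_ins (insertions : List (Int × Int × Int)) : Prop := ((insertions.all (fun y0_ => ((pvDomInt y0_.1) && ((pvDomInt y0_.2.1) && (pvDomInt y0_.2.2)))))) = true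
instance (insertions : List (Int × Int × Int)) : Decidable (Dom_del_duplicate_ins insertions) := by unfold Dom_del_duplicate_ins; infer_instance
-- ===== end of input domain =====

-- B groups the sorted insertions by contiguous runs of equal (index,len) keys in one pass,
-- instead of A's per-element dict membership test with append-or-create; same cost, alternative structure.


-- sorted(list of int 3-tuples) compares tuples lexicographically: modelled by this key
def pvSortKey (t : Int × Int × Int) : Int ×ₗ Int ×ₗ Int := toLex (t.1, toLex (t.2.1, t.2.2))

-- ===== PORT A =====
def del_duplicate_ins (insertions : List (Int × Int × Int)) : List (Int × Int × List Int) :=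
  (((PySem.List.sorted insertions pvSortKey false).foldl (fun d t =>
      if d.contains (t.1, t.2.1) then d.modify (t.1, t.2.1) [] (fun l => l ++ [t.2.2])
      else d.insert (t.1, t.2.1) [t.2.2]) PySem.Dict.empty).items).map
    (fun p => (p.1.1, p.1.2, p.2))

-- ===== PORT B =====
def pvKf (t : Int × Int × Int) : Int × Int := (t.1, t.2.1)

-- the run-consuming while loops of Source B: take the run of equal keys, emit it, continue after it
def pvGroupRuns : List (Int × Int × Int) → List (Int × Int × List Int)
  | [] => []
  | t :: rest =>
    (t.1, t.2.1, t.2.2 :: (rest.takeWhile (fun u => pvKf u == pvKf t)).map (fun u => u.2.2)) ::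
      pvGroupRuns (rest.dropWhile (fun u => pvKf u == pvKf t))
termination_by l => l.length
decreasing_by
  exact Nat.lt_succ_of_le (List.length_dropWhile_le _ _)

def del_duplicate_ins_alt (insertions : List (Int × Int × Int)) : List (Int × Int × List Int) :=
  pvGroupRuns (PySem.List.sorted insertions pvSortKey false)

-- ===== PRECONDITION & SPEC =====
def Spec_del_duplicate_ins (insertions : List (Int × Int × Int)) (out : List (Int × Int × List Int)) : Prop := out = del_duplicate_ins_alt insertions
instance (insertions : List (Int × Int × Int)) (out : List (Int × Int × List Int)) : Decidable (Spec_del_duplicate_ins insertions out) := by unfold Spec_del_duplicate_ins; infer_instance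

-- ===== CLAIM (what is proved, stated in full; the proofs are below) =====
def Claim_equal_del_duplicate_ins : Prop := ∀ (insertions : List (Int × Int × Int)), Dom_del_duplicate_ins insertions → Spec_del_duplicate_ins insertions (del_duplicate_ins insertions)

-- ===== LEMMAS AND PROOFS =====

-- strict lexicographic order on the (index,len) keys
def pvLt (a b : Int × Int) : Prop := a.1 < b.1 ∨ (a.1 = b.1 ∧ a.2 < b.2)

-- the order relation a sorted list's consecutive keys satisfy
def pvR (a b : Int × Int × Int) : Prop := pvKf a = pvKf b ∨ pvLt (pvKf a) (pvKf b)

lemma pvLt_trans {a b c : Int × Int} (h1 : pvLt a b) (h2 : pvLt b c) : pvLt a c := by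
  unfold pvLt at *; omega

lemma pvLt_irrefl {a : Int × Int} (h : pvLt a a) : False := by
  unfold pvLt at h; omega

lemma pvR_of_le {a b : Int × Int × Int} (h : pvSortKey a ≤ pvSortKey b) : pvR a b := by
  obtain ⟨a1, a2, a3⟩ := a; obtain ⟨b1, b2, b3⟩ := b
  simp only [pvSortKey, Prod.Lex.le_iff, ofLex_toLex] at h
  simp only [pvR, pvKf, pvLt, Prod.mk.injEq]
  omega

lemma sorted_pairwise_pvR (l : List (Int × Int × Int)) :
    (PySem.List.sorted l pvSortKey false).Pairwise pvR :=
  (PySem.List.sorted_pairwise l pvSortKey).imp pvR_of_le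

-- A's fold is the unconditional modify-append fold
lemma foldA_eq_modify (s : List (Int × Int × Int)) :
    s.foldl (fun d t =>
      if d.contains (t.1, t.2.1) then d.modify (t.1, t.2.1) [] (fun l => l ++ [t.2.2])
      else d.insert (t.1, t.2.1) [t.2.2]) PySem.Dict.empty
    = s.foldl (fun d t => d.modify (pvKf t) [] (fun l => l ++ [t.2.2])) PySem.Dict.empty := by
  apply PySem.List.foldl_congr_mem
  intro d t _
  simp only [pvKf]
  by_cases h : d.contains (t.1, t.2.1)
  · simp [h]
  · simp only [Bool.not_eq_true] at h
    simp [h, PySem.Dict.modify, PySem.Dict.getD_of_not_contains d [] h]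

-- characterisation of A's result as dedup'd keys with filtered values
lemma portA_char (s : List (Int × Int × Int)) :
    (s.foldl (fun d t => d.modify (pvKf t) [] (fun l => l ++ [t.2.2])) PySem.Dict.empty).items
    = (PySem.Set.ofList (s.map pvKf)).map
        (fun k => (k, (s.filter (fun t => pvKf t == k)).map (fun t => t.2.2))) := by
  have hnd : (s.foldl (fun d t => d.modify (pvKf t) [] (fun l => l ++ [t.2.2]))
      PySem.Dict.empty).keys.Nodup := by
    apply PySem.Dict.nodup_keys_foldl_modify_key s pvKf [] (fun _ t l => l ++ [t.2.2])
    simp [PySem.Dict.keys_empty]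
  rw [PySem.Dict.items_eq_map_keys _ hnd []]
  rw [PySem.Dict.keys_foldl_modify_key s pvKf [] (fun _ t l => l ++ [t.2.2])]
  rw [PySem.Dict.keys_empty]
  show List.map _ (PySem.Set.ofList (s.map pvKf)) = _
  apply List.map_congr_left
  intro k _
  congr 1
  have hfold : s.foldl (fun d t => d.modify (pvKf t) [] (fun l => l ++ [t.2.2])) PySem.Dict.empty
      = (s.map (fun t => (pvKf t, t.2.2))).foldl
          (fun d p => d.modify p.1 [] (fun l => l ++ [p.2])) PySem.Dict.empty := by
    rw [List.foldl_map]
  rw [hfold, PySem.Dict.getD_foldl_modify_append, PySem.Dict.getD_empty]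
  rw [List.filter_map]
  simp only [Function.comp_def, List.map_map, List.nil_append]

-- Set.ofList helpers
lemma foldl_add_of_all_mem {α : Type} [BEq α] [LawfulBEq α] (l : List α) (s : PySem.Set α)
    (h : ∀ y ∈ l, y ∈ s) : l.foldl PySem.Set.add s = s := by
  induction l with
  | nil => rfl
  | cons y l ih =>
    have hy : PySem.Set.add s y = s := by
      show (if s.contains y then s else s ++ [y]) = s
      simp [h y (by simp)]
    simp only [List.foldl_cons, hy]
    exact ih (fun z hz => h z (by simp [hz]))

lemma foldl_add_cons_notmem {α : Type} [BEq α] [LawfulBEq α] (l : List α) (s : List α) (x : α)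
    (h : x ∉ l) : l.foldl PySem.Set.add (x :: s) = x :: l.foldl PySem.Set.add s := by
  induction l generalizing s with
  | nil => rfl
  | cons y l ih =>
    have hyx : (y == x) = false := by
      simp only [beq_eq_false_iff_ne, ne_eq]
      rintro rfl; exact h (by simp)
    have hstep : PySem.Set.add (x :: s) y = x :: PySem.Set.add s y := by
      show (if (x :: s).contains y then x :: s else (x :: s) ++ [y])
          = x :: (if s.contains y then s else s ++ [y])
      by_cases hc : y ∈ s <;> simp [hc, hyx]
    simp only [List.foldl_cons, hstep]
    exact ih _ (fun hx => h (by simp [hx]))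

-- the grouping recursion computes the same dedup/filter characterisation on a pvR-sorted list
lemma groupRuns_char (s : List (Int × Int × Int)) (hs : s.Pairwise pvR) :
    pvGroupRuns s
    = ((PySem.Set.ofList (s.map pvKf)).map
        (fun k => (k, (s.filter (fun t => pvKf t == k)).map (fun t => t.2.2)))).map
        (fun p => (p.1.1, p.1.2, p.2)) := by
  induction s using pvGroupRuns.induct with
  | case1 => simp [pvGroupRuns]
  | case2 t rest ih =>
    have hRt : ∀ u ∈ rest, pvR t u := (List.pairwise_cons.mp hs).1
    have hrest : rest.Pairwise pvR := (List.pairwise_cons.mp hs).2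
    -- abbreviations
    have hsplit : rest.takeWhile (fun u => pvKf u == pvKf t)
        ++ rest.dropWhile (fun u => pvKf u == pvKf t) = rest :=
      List.takeWhile_append_dropWhile
    have hrun : ∀ u ∈ rest.takeWhile (fun u => pvKf u == pvKf t), pvKf u = pvKf t := by
      intro u hu
      simpa using List.mem_takeWhile_imp hu
    have hdrop : ∀ u ∈ rest.dropWhile (fun u => pvKf u == pvKf t), pvLt (pvKf t) (pvKf u) := by
      intro u hu
      have hsub := List.dropWhile_sublist (l := rest) (fun u => pvKf u == pvKf t)
      cases hcase : rest.dropWhile (fun u => pvKf u == pvKf t) with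
      | nil => rw [hcase] at hu; cases hu
      | cons h0 tl =>
        have hh0ne : pvKf h0 ≠ pvKf t := by
          have := List.head_dropWhile_not (fun u => pvKf u == pvKf t)
            (l := rest) (by rw [hcase]; simp)
          simp only [hcase, List.head_cons] at this
          simpa using this
        have hh0mem : h0 ∈ rest := hsub.subset (by rw [hcase]; simp)
        have hlt0 : pvLt (pvKf t) (pvKf h0) := by
          rcases hRt h0 hh0mem with h | h
          · exact absurd h.symm hh0ne
          · exact h
        rw [hcase] at hu
        rcases List.mem_cons.mp hu with rfl | hu
        · exact hlt0
        · have hdp : (rest.dropWhile (fun u => pvKf u == pvKf t)).Pairwise pvR :=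
            hrest.sublist hsub
          rw [hcase] at hdp
          rcases (List.pairwise_cons.mp hdp).1 u hu with h | h
          · rw [← h]; exact hlt0
          · exact pvLt_trans hlt0 h
    have hdropne : ∀ u ∈ rest.dropWhile (fun u => pvKf u == pvKf t), pvKf u ≠ pvKf t := by
      intro u hu heq
      exact pvLt_irrefl (heq ▸ hdrop u hu)
    -- key-list decomposition
    have hmapkeys : (t :: rest).map pvKf
        = pvKf t :: ((rest.takeWhile (fun u => pvKf u == pvKf t)).map pvKf
            ++ (rest.dropWhile (fun u => pvKf u == pvKf t)).map pvKf) := by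
      rw [← List.map_append, hsplit]; rfl
    have hofList : PySem.Set.ofList ((t :: rest).map pvKf)
        = pvKf t :: PySem.Set.ofList ((rest.dropWhile (fun u => pvKf u == pvKf t)).map pvKf) := by
      rw [hmapkeys]
      show List.foldl PySem.Set.add (PySem.Set.add [] (pvKf t)) _ = _
      have hadd : PySem.Set.add ([] : PySem.Set (Int × Int)) (pvKf t) = [pvKf t] := rfl
      rw [hadd, List.foldl_append]
      have hskip : ((rest.takeWhile (fun u => pvKf u == pvKf t)).map pvKf).foldl
          PySem.Set.add [pvKf t] = [pvKf t] := by
        apply foldl_add_of_all_mem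
        intro y hy
        rcases List.mem_map.mp hy with ⟨u, hu, rfl⟩
        simp [hrun u hu]
      rw [hskip]
      have hnotmem : pvKf t ∉ (rest.dropWhile (fun u => pvKf u == pvKf t)).map pvKf := by
        intro hmem
        rcases List.mem_map.mp hmem with ⟨u, hu, he⟩
        exact hdropne u hu he
      exact foldl_add_cons_notmem _ [] _ hnotmem
    -- head group: the filter over the whole list is t :: run
    have hfiltk : (t :: rest).filter (fun u => pvKf u == pvKf t)
        = t :: rest.takeWhile (fun u => pvKf u == pvKf t) := by
      rw [List.filter_cons_of_pos (by simp)]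
      conv_lhs => rw [← hsplit]
      rw [List.filter_append]
      rw [List.filter_eq_self.mpr (by intro u hu; simpa using hrun u hu)]
      rw [List.filter_eq_nil_iff.mpr (by intro u hu; simpa using hdropne u hu)]
      rw [List.append_nil]
    -- later groups: filters over the whole list reduce to filters over the tail
    have hfilt' : ∀ k ∈ PySem.Set.ofList ((rest.dropWhile (fun u => pvKf u == pvKf t)).map pvKf),
        (t :: rest).filter (fun u => pvKf u == k)
          = (rest.dropWhile (fun u => pvKf u == pvKf t)).filter (fun u => pvKf u == k) := by
      intro k hk
      rcases List.mem_map.mp ((PySem.Set.mem_ofList _ _).mp hk) with ⟨w, hw, rfl⟩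
      have hkne : pvKf t ≠ pvKf w := fun he => pvLt_irrefl (he ▸ hdrop w hw)
      have hsrw : (t :: rest) = (t :: rest.takeWhile (fun u => pvKf u == pvKf t))
          ++ rest.dropWhile (fun u => pvKf u == pvKf t) := by
        conv_lhs => rw [← hsplit]
        rw [List.cons_append]
      rw [hsrw, List.filter_append]
      rw [List.filter_eq_nil_iff.mpr (by
            intro u hu
            rcases List.mem_cons.mp hu with rfl | hu
            · simpa using hkne
            · rw [hrun u hu]; simpa using hkne)]
      rw [List.nil_append]
    -- assemble
    rw [pvGroupRuns, hofList]
    rw [ih (hrest.sublist (List.dropWhile_sublist _))]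
    simp only [List.map_cons, List.map_map]
    refine congrArg₂ _ ?_ ?_
    · rw [hfiltk]
      simp [pvKf]
    · apply List.map_congr_left
      intro k hk
      simp only [Function.comp_def]
      rw [hfilt' k hk]

-- ===== VERDICT (by name: the statement is the Claim_ definition above) =====
theorem del_duplicate_ins_spec : Claim_equal_del_duplicate_ins := by
  intro insertions _
  unfold Spec_del_duplicate_ins del_duplicate_ins del_duplicate_ins_alt
  rw [foldA_eq_modify, portA_char, groupRuns_char _ (sorted_pairwise_pvR insertions)]
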